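-- pv_equiv track=rewrite | github.com/BINDELAAJAYKUMARREDDY/VYASA-1 | app/agent.py | generate_rule_based
-- ===== SOURCE A (Python) =====
-- def generate_rule_based(prompt):
--     lines = prompt.split("\n")
--     user_line = ""
--     for l in lines:
--         if l.startswith("User says:"):
--             user_line = l.replace("User says:", "").strip()
--             break
--
--     emotion_line = ""
--     for l in lines:
--         if l.startswith("DETECTED EMOTION:"):
--             emotion_line = l.replace("DETECTED EMOTION:", "").strip()
--             break
--
--     verse_section = ""
--     in_verse = False
--     for l in lines:
--         if "RELEVANT SCRIPTURE CONTEXT" in l: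
--             in_verse = True
--         if in_verse:
--             verse_section += l + "\n"
--         if "CONVERSATION HISTORY" in l:
--             break
--
--     return f"""Dear seeker, your feelings have been heard with great care and compassion.
--
-- What you are experiencing — {emotion_line} — is something the ancient Rishis deeply understood and addressed in our eternal scriptures.
--
-- {verse_section[:600] if verse_section else ""}
--
-- From the Bhagavad Gita (2.14):
-- Sanskrit: Matra-sparshas tu kaunteya shitoshna-sukha-duhkha-dah
-- Translation: O Arjuna, these feelings of heat and cold, pleasure and pain — they come and go. They are temporary. Endure them with patience.
--
-- From the Bhagavad Gita (2.47):
-- Sanskrit: Karmanyevadhikaraste ma phaleshu kadachana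
-- Translation: You have the right to perform your duty, but you are never the master of its fruits.
--
-- From the Upanishads (Mandukya 1.2):
-- Translation: All this universe is Brahman. You are not separate from the infinite.
--
-- What this means for you:
-- Your struggle is real, but it is also temporary. The eternal Atman within you — your true self — cannot be touched by any circumstance. The Bhagavad Gita was spoken by Lord Krishna at the moment of Arjuna's greatest crisis. That same wisdom is here for you now.
--
-- Actionable Steps:
-- 1. Sit quietly for 5 minutes, breathe slowly, and recite: "Aham Brahmasmi" — I am the eternal Brahman. Feel it.
-- 2. Take one small purposeful action toward what matters to you today — action is the antidote.
-- 3. Read Bhagavad Gita Chapter 2 slowly once today and let its truth settle into you.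
--
-- You are not alone. The eternal wisdom of our ancestors walks with you. Tat Tvam Asi — Thou Art That. You are the consciousness that pervades all things. Nothing real can be taken from you."""
-- ===== SOURCE B (Python) =====
-- def generate_rule_based(prompt):
--     emotion = None
--     verse = ""
--     in_verse = False
--     verse_done = False
--     for l in prompt.split("\n"):
--         if emotion is None and l.startswith("DETECTED EMOTION:"):
--             emotion = l.replace("DETECTED EMOTION:", "").strip()
--         if not verse_done:
--             if "RELEVANT SCRIPTURE CONTEXT" in l:
--                 in_verse = True
--             if in_verse:
--                 verse += l + "\n"
--             if "CONVERSATION HISTORY" in l: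
--                 verse_done = True
--     emotion_line = emotion if emotion is not None else ""
--     return f"""Dear seeker, your feelings have been heard with great care and compassion.
--
-- What you are experiencing — {emotion_line} — is something the ancient Rishis deeply understood and addressed in our eternal scriptures.
--
-- {verse[:600] if verse else ""}
--
-- From the Bhagavad Gita (2.14):
-- Sanskrit: Matra-sparshas tu kaunteya shitoshna-sukha-duhkha-dah
-- Translation: O Arjuna, these feelings of heat and cold, pleasure and pain — they come and go. They are temporary. Endure them with patience.
--
-- From the Bhagavad Gita (2.47):
-- Sanskrit: Karmanyevadhikaraste ma phaleshu kadachana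
-- Translation: You have the right to perform your duty, but you are never the master of its fruits.
--
-- From the Upanishads (Mandukya 1.2):
-- Translation: All this universe is Brahman. You are not separate from the infinite.
--
-- What this means for you:
-- Your struggle is real, but it is also temporary. The eternal Atman within you — your true self — cannot be touched by any circumstance. The Bhagavad Gita was spoken by Lord Krishna at the moment of Arjuna's greatest crisis. That same wisdom is here for you now.
--
-- Actionable Steps:
-- 1. Sit quietly for 5 minutes, breathe slowly, and recite: "Aham Brahmasmi" — I am the eternal Brahman. Feel it.
-- 2. Take one small purposeful action toward what matters to you today — action is the antidote.
-- 3. Read Bhagavad Gita Chapter 2 slowly once today and let its truth settle into you.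
--
-- You are not alone. The eternal wisdom of our ancestors walks with you. Tat Tvam Asi — Thou Art That. You are the consciousness that pervades all things. Nothing real can be taken from you."""
-- ===== Notes on version B (the rewrite author's own statement) =====
-- stated objective: simpler
-- what changed: B replaces A's three separate scans over the split lines with a single pass carrying a first-match emotion accumulator and in_verse/verse_done flags, and drops A's dead user_line scan (its result is never interpolated).
import Mathlib
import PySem

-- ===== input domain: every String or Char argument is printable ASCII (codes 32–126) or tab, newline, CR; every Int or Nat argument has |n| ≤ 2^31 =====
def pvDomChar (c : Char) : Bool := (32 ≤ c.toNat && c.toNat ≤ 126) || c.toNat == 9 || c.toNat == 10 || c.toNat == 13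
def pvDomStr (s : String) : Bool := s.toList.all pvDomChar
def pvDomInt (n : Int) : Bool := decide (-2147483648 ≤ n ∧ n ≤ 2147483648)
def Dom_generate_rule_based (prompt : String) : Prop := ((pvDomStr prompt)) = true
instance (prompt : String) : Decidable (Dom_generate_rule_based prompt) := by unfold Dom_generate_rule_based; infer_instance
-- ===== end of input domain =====

-- B replaces A's three separate scans over the lines with one single pass carrying an
-- emotion accumulator and in_verse/verse_done flags, and drops A's dead user_line scan (objective: simpler).

-- The fixed response template shared verbatim by both Pythons' f-string (text before the
-- emotion slot, between the slots, and after the verse slot), with the identical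
-- `verse_section[:600] if verse_section else ""` guard.
def pvTemplate (emotion_line verse_section : String) : String :=
  "Dear seeker, your feelings have been heard with great care and compassion.\n\nWhat you are experiencing — " ++ emotion_line ++ " — is something the ancient Rishis deeply understood and addressed in our eternal scriptures.\n\n" ++
    (if verse_section = "" then "" else PySem.Str.slice verse_section none (some 600)) ++ "\n\nFrom the Bhagavad Gita (2.14):\nSanskrit: Matra-sparshas tu kaunteya shitoshna-sukha-duhkha-dah\nTranslation: O Arjuna, these feelings of heat and cold, pleasure and pain — they come and go. They are temporary. Endure them with patience.\n\nFrom the Bhagavad Gita (2.47):\nSanskrit: Karmanyevadhikaraste ma phaleshu kadachana\nTranslation: You have the right to perform your duty, but you are never the master of its fruits.\n\nFrom the Upanishads (Mandukya 1.2):\nTranslation: All this universe is Brahman. You are not separate from the infinite.\n\nWhat this means for you:\nYour struggle is real, but it is also temporary. The eternal Atman within you — your true self — cannot be touched by any circumstance. The Bhagavad Gita was spoken by Lord Krishna at the moment of Arjuna's greatest crisis. That same wisdom is here for you now.\n\nActionable Steps:\n1. Sit quietly for 5 minutes, breathe slowly, and recite: \"Aham Brahmasmi\" — I am the eternal Brahman.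 Feel it.\n2. Take one small purposeful action toward what matters to you today — action is the antidote.\n3. Read Bhagavad Gita Chapter 2 slowly once today and let its truth settle into you.\n\nYou are not alone. The eternal wisdom of our ancestors walks with you. Tat Tvam Asi — Thou Art That. You are the consciousness that pervades all things. Nothing real can be taken from you."

-- ===== PORT A =====
-- first loop of A: first line starting with "User says:" (result is never used by the template)
def pvFindUser : List String → String
  | [] => ""
  | l :: ls =>
    if PySem.Str.startswith l "User says:" then
      PySem.Str.strip (PySem.Str.replace l "User says:" "")
    else pvFindUser ls

-- second loop of A: first line starting with "DETECTED EMOTION:"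
def pvFindEmotion : List String → String
  | [] => ""
  | l :: ls =>
    if PySem.Str.startswith l "DETECTED EMOTION:" then
      PySem.Str.strip (PySem.Str.replace l "DETECTED EMOTION:" "")
    else pvFindEmotion ls

-- third loop of A: collect the verse section, breaking on "CONVERSATION HISTORY"
def pvVerseLoop : List String → Bool → String → String
  | [], _, acc => acc
  | l :: ls, in_verse, acc =>
    let in_verse' := if PySem.Str.isIn "RELEVANT SCRIPTURE CONTEXT" l then true else in_verse
    let acc' := if in_verse' then acc ++ l ++ "\n" else acc
    if PySem.Str.isIn "CONVERSATION HISTORY" l then acc' else pvVerseLoop ls in_verse' acc'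

def generate_rule_based (prompt : String) : String :=
  let lines := (PySem.Str.split? prompt "\n").getD []
  let _user_line := pvFindUser lines
  let emotion_line := pvFindEmotion lines
  let verse_section := pvVerseLoop lines false ""
  pvTemplate emotion_line verse_section

-- ===== PORT B =====
-- B's single pass: state = (first emotion match so far, verse accumulator, in_verse, verse_done)
def pvScan : List String → Option String → String → Bool → Bool → Option String × String
  | [], emo, verse, _, _ => (emo, verse)
  | l :: ls, emo, verse, in_verse, verse_done =>
    let emo' := if emo.isNone && PySem.Str.startswith l "DETECTED EMOTION:" then
        some (PySem.Str.strip (PySem.Str.replace l "DETECTED EMOTION:" ""))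
      else emo
    if verse_done then pvScan ls emo' verse in_verse verse_done
    else
      let in_verse' := if PySem.Str.isIn "RELEVANT SCRIPTURE CONTEXT" l then true else in_verse
      let verse' := if in_verse' then verse ++ l ++ "\n" else verse
      let verse_done' := PySem.Str.isIn "CONVERSATION HISTORY" l
      pvScan ls emo' verse' in_verse' verse_done'

def generate_rule_based_alt (prompt : String) : String :=
  let (emo, verse) := pvScan ((PySem.Str.split? prompt "\n").getD []) none "" false false
  pvTemplate (emo.getD "") verse

-- ===== PRECONDITION & SPEC =====
def Spec_generate_rule_based (prompt : String) (out : String) : Prop := out = generate_rule_based_alt prompt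
instance (prompt : String) (out : String) : Decidable (Spec_generate_rule_based prompt out) := by unfold Spec_generate_rule_based; infer_instance

-- ===== CLAIM (what is proved, stated in full; the proofs are below) =====
def Claim_equal_generate_rule_based : Prop := ∀ (prompt : String), Dom_generate_rule_based prompt → Spec_generate_rule_based prompt (generate_rule_based prompt)

-- ===== LEMMAS AND PROOFS =====

-- A's emotion loop as an Option (B's accumulator shape): some ↔ a matching line exists
def pvEmoOpt : List String → Option String
  | [] => none
  | l :: ls =>
    if PySem.Str.startswith l "DETECTED EMOTION:" then
      some (PySem.Str.strip (PySem.Str.replace l "DETECTED EMOTION:" ""))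
    else pvEmoOpt ls

theorem pvEmoOpt_getD (ls : List String) : (pvEmoOpt ls).getD "" = pvFindEmotion ls := by
  induction ls with
  | nil => rfl
  | cons l ls ih =>
    simp only [pvEmoOpt, pvFindEmotion]
    split <;> simp [ih]

-- absorbing one line's emotion update into the first-match Option accumulator
theorem pvOrStep (c : Bool) (v : String) (emo r : Option String) :
    (if (emo.isNone && c) = true then some v else emo).or r
      = emo.or (if c = true then some v else r) := by
  cases emo <;> cases c <;> simp [Option.or]

-- the single-pass invariant: B's scan computes A's two remaining loops
theorem pvScan_eq (ls : List String) : ∀ (emo : Option String) (verse : String)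
    (inv done : Bool),
    pvScan ls emo verse inv done =
      (emo.or (pvEmoOpt ls), if done then verse else pvVerseLoop ls inv verse) := by
  induction ls with
  | nil => intro emo verse inv done; cases done <;> simp [pvScan, pvEmoOpt, pvVerseLoop]
  | cons l ls ih =>
    intro emo verse inv done
    simp only [pvScan, ih, pvOrStep, pvEmoOpt, pvVerseLoop]
    cases done <;> simp

-- ===== VERDICT (by name: the statement is the Claim_ definition above) =====
theorem generate_rule_based_spec : Claim_equal_generate_rule_based := by
  intro prompt _
  unfold Spec_generate_rule_based generate_rule_based generate_rule_based_alt
  rw [pvScan_eq]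
  simp [Option.or, pvEmoOpt_getD]
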